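-- pv_equiv track=rewrite | github.com/Karpman-Consulting/DOE2-229RPDGenerator | rpd_generator/utilities/jsonpath_utils.py | split_jsonpath
-- ===== SOURCE A (Python) =====
-- def split_jsonpath(jpath):
--     """Splits the JSONPath into keys, handling filters properly."""
--     result = []
--     buffer = ""
--     in_brackets = 0
--
--     for char in jpath:
--         if char == "." and in_brackets == 0:
--             if buffer:
--                 result.append(buffer)
--                 buffer = ""
--         elif char == "[":
--             in_brackets += 1
--             buffer += char
--         elif char == "]":
--             in_brackets -= 1
--             buffer += char
--         else:
--             buffer += char
--
--     if buffer:
--         result.append(buffer)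
--
--     return [key for key in result if key != "$"]
-- ===== SOURCE B (Python) =====
-- def split_jsonpath(jpath):
--     """Splits the JSONPath into keys, handling filters properly."""
--     n = len(jpath)
--     depth = 0
--     cuts = []
--     for i, ch in enumerate(jpath):
--         if ch == "[":
--             depth += 1
--         elif ch == "]":
--             depth -= 1
--         elif ch == "." and depth == 0:
--             cuts.append(i)
--     starts = [0] + [i + 1 for i in cuts]
--     ends = cuts + [n]
--     segments = [jpath[a:b] for a, b in zip(starts, ends)]
--     return [seg for seg in segments if seg and seg != "$"]
-- ===== Notes on version B (the rewrite author's own statement) =====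
-- stated objective: alternative
-- what changed: Replaces the single pass with a growing character buffer by a two-pass scheme: first collect the indices of top-level dots with a depth counter, then slice the string at those boundaries and filter out empty and '$' segments.
import Mathlib
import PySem

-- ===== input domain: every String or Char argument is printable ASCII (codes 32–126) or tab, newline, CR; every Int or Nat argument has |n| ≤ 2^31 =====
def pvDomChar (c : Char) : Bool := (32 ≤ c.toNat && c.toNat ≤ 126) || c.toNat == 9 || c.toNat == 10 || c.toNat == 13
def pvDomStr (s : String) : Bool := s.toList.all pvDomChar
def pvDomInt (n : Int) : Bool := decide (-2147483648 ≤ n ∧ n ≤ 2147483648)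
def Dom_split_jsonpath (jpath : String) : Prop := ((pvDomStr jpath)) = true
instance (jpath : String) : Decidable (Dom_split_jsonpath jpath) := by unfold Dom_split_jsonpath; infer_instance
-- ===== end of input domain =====

-- B replaces A's single buffered pass by index collection + slicing (alternative decomposition, same cost).

-- ===== PORT A =====
-- one loop step of A: state is (result, buffer, in_brackets)
def pvStepA (st : List (List Char) × List Char × Int) (c : Char) :
    List (List Char) × List Char × Int :=
  if c = '.' ∧ st.2.2 = 0 then
    (if st.2.1 ≠ [] then st.1 ++ [st.2.1] else st.1, [], st.2.2)
  else if c = '[' then (st.1, st.2.1 ++ [c], st.2.2 + 1)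
  else if c = ']' then (st.1, st.2.1 ++ [c], st.2.2 - 1)
  else (st.1, st.2.1 ++ [c], st.2.2)

def split_jsonpath (jpath : String) : List String :=
  let st := jpath.toList.foldl pvStepA ([], [], 0)
  let res := if st.2.1 ≠ [] then st.1 ++ [st.2.1] else st.1
  (res.map String.ofList).filter (fun k => !(k == "$"))

-- ===== PORT B =====
-- first pass of B: indices (enumerate counter i) of '.' at bracket depth 0
def pvCutsB : List Char → Int → Nat → List Nat
  | [], _, _ => []
  | c :: rest, d, i =>
    if c = '[' then pvCutsB rest (d + 1) (i + 1)
    else if c = ']' then pvCutsB rest (d - 1) (i + 1)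
    else if c = '.' ∧ d = 0 then i :: pvCutsB rest d (i + 1)
    else pvCutsB rest d (i + 1)

def split_jsonpath_alt (jpath : String) : List String :=
  let s := jpath.toList
  let n := s.length
  let cuts := pvCutsB s 0 0
  let starts := 0 :: cuts.map (· + 1)
  let ends := cuts ++ [n]
  -- jpath[a:b] with 0 ≤ a ≤ b ≤ n natural bounds: exact as (drop a).take (b-a) (PySem.List.slice_natCast)
  let segments := (starts.zip ends).map (fun p => String.ofList ((s.drop p.1).take (p.2 - p.1)))
  segments.filter (fun seg => !(seg == "") && !(seg == "$"))

-- ===== PRECONDITION & SPEC =====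
def Spec_split_jsonpath (jpath : String) (out : List String) : Prop := out = split_jsonpath_alt jpath
instance (jpath : String) (out : List String) : Decidable (Spec_split_jsonpath jpath out) := by unfold Spec_split_jsonpath; infer_instance

-- ===== CLAIM (what is proved, stated in full; the proofs are below) =====
def Claim_equal_split_jsonpath : Prop := ∀ (jpath : String), Dom_split_jsonpath jpath → Spec_split_jsonpath jpath (split_jsonpath jpath)

-- ===== LEMMAS AND PROOFS =====

-- common recursive characterization: raw segments (possibly empty) between top-level dots
def pvBump (d : Int) (c : Char) : Int := if c = '[' then d + 1 else if c = ']' then d - 1 else d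

def pvConsHead (c : Char) : List (List Char) → List (List Char)
  | [] => [[c]]
  | x :: xs => (c :: x) :: xs

def pvSegSpec : Int → List Char → List (List Char)
  | _, [] => [[]]
  | d, c :: rest =>
    if c = '.' ∧ d = 0 then [] :: pvSegSpec 0 rest
    else pvConsHead c (pvSegSpec (pvBump d c) rest)

lemma pvSegSpec_ne_nil (d : Int) (s : List Char) : pvSegSpec d s ≠ [] := by
  cases s with
  | nil => simp [pvSegSpec]
  | cons c rest =>
    simp only [pvSegSpec]
    split
    · simp
    · cases h : pvSegSpec (pvBump d c) rest <;> simp [pvConsHead]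

-- prepend a buffer onto the first raw segment
def pvConsList (buf : List Char) : List (List Char) → List (List Char)
  | [] => [buf]
  | x :: xs => (buf ++ x) :: xs

lemma pvConsList_nil {l : List (List Char)} (h : l ≠ []) : pvConsList [] l = l := by
  cases l with
  | nil => exact absurd rfl h
  | cons x xs => simp [pvConsList]

lemma pvConsList_consHead (buf : List Char) (c : Char) (l : List (List Char)) :
    pvConsList (buf ++ [c]) l = pvConsList buf (pvConsHead c l) := by
  cases l <;> simp [pvConsList, pvConsHead]

-- A-side invariant
lemma pvA_inv (s : List Char) : ∀ (res : List (List Char)) (buf : List Char) (d : Int),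
    (let st := s.foldl pvStepA (res, buf, d);
     if st.2.1 ≠ [] then st.1 ++ [st.2.1] else st.1)
      = res ++ (pvConsList buf (pvSegSpec d s)).filter (fun x => !(x == [])) := by
  induction s with
  | nil =>
    intro res buf d
    cases buf <;> simp [pvSegSpec, pvConsList]
  | cons c rest ih =>
    intro res buf d
    simp only [List.foldl_cons, pvStepA, pvSegSpec]
    by_cases hdot : c = '.' ∧ d = 0
    · simp only [if_pos hdot]
      rw [ih]
      obtain ⟨hc, hd⟩ := hdot
      subst hd
      rw [pvConsList_nil (pvSegSpec_ne_nil 0 rest)]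
      cases buf with
      | nil => simp [pvConsList]
      | cons b bs => simp [pvConsList]
    · simp only [if_neg hdot]
      have hb : pvBump d c = (if c = '[' then d + 1 else if c = ']' then d - 1 else d) := rfl
      by_cases h1 : c = '['
      · simp only [if_pos h1]
        rw [ih, pvConsList_consHead]
        simp [pvBump, h1]
      · by_cases h2 : c = ']'
        · simp only [if_neg h1, if_pos h2]
          rw [ih, pvConsList_consHead]
          simp [pvBump, h2]
        · simp only [if_neg h1, if_neg h2]
          rw [ih, pvConsList_consHead]
          simp [pvBump, h1, h2]

-- B-side: walk form of the zip/slice pass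
def pvWalk (s : List Char) : Nat → List Nat → List (List Char)
  | prev, [] => [(s.drop prev).take (s.length - prev)]
  | prev, k :: ks => ((s.drop prev).take (k - prev)) :: pvWalk s (k + 1) ks

lemma pvZip_walk (f : Nat × Nat → List Char) (s : List Char)
    (hf : ∀ p : Nat × Nat, f p = (s.drop p.1).take (p.2 - p.1)) :
    ∀ (cuts : List Nat) (prev : Nat),
    ((prev :: cuts.map (· + 1)).zip (cuts ++ [s.length])).map f = pvWalk s prev cuts := by
  intro cuts
  induction cuts with
  | nil => intro prev; simp [pvWalk, hf]
  | cons k ks ih =>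
    intro prev
    simp only [List.map_cons, List.cons_append, List.zip_cons_cons, List.map, pvWalk, hf]
    exact congrArg _ (by simpa [hf] using ih (k + 1))

lemma pvCuts_shift (s : List Char) : ∀ (d : Int) (i : Nat),
    pvCutsB s d i = (pvCutsB s d 0).map (· + i) := by
  induction s with
  | nil => intro d i; simp [pvCutsB]
  | cons c rest ih =>
    intro d i
    simp only [pvCutsB]
    split
    · rw [ih _ (i + 1), ih _ 1, List.map_map]
      exact List.map_congr_left (fun x _ => by simp [Function.comp]; omega)
    · split
      · rw [ih _ (i + 1), ih _ 1, List.map_map]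
        exact List.map_congr_left (fun x _ => by simp [Function.comp]; omega)
      · split
        · rw [ih _ (i + 1), ih _ 1, List.map_cons, List.map_map]
          simp only [Nat.zero_add]
          exact congrArg _ (List.map_congr_left (fun x _ => by simp [Function.comp]; omega))
        · rw [ih _ (i + 1), ih _ 1, List.map_map]
          exact List.map_congr_left (fun x _ => by simp [Function.comp]; omega)

lemma pvWalk_cons (c : Char) (t : List Char) :
    ∀ (ks : List Nat) (p : Nat), pvWalk (c :: t) (p + 1) (ks.map (· + 1)) = pvWalk t p ks := by
  intro ks
  induction ks with
  | nil =>
    intro p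
    simp only [List.map_nil, pvWalk, List.drop_succ_cons, List.length_cons]
    have h : t.length + 1 - (p + 1) = t.length - p := by omega
    rw [h]
  | cons k ks ih =>
    intro p
    simp only [List.map_cons, pvWalk, List.drop_succ_cons]
    have h : k + 1 - (p + 1) = k - p := by omega
    rw [h, ih (k + 1)]

lemma pvWalk_head (c : Char) (t : List Char) (ks : List Nat) :
    pvWalk (c :: t) 0 (ks.map (· + 1)) = pvConsHead c (pvWalk t 0 ks) := by
  cases ks with
  | nil => simp [pvWalk, pvConsHead, List.take_length]
  | cons k ks =>
    simp only [List.map_cons, pvWalk, pvConsHead, List.drop_zero, Nat.sub_zero,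
      List.take_succ_cons]
    exact congrArg _ (pvWalk_cons c t ks (k + 1))

lemma pvB_main (s : List Char) : ∀ d : Int, pvWalk s 0 (pvCutsB s d 0) = pvSegSpec d s := by
  induction s with
  | nil => intro d; simp [pvCutsB, pvWalk, pvSegSpec]
  | cons c rest ih =>
    intro d
    simp only [pvCutsB, pvSegSpec]
    by_cases h1 : c = '['
    · simp only [if_pos h1, if_neg (by simp [h1] : ¬(c = '.' ∧ d = 0))]
      rw [pvCuts_shift, pvWalk_head, ih]
      simp [pvBump, h1]
    · by_cases h2 : c = ']'
      · simp only [if_neg h1, if_pos h2, if_neg (by simp [h2] : ¬(c = '.' ∧ d = 0))]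
        rw [pvCuts_shift, pvWalk_head, ih]
        simp [pvBump, h2]
      · by_cases hdot : c = '.' ∧ d = 0
        · simp only [if_neg h1, if_neg h2, if_pos hdot]
          simp only [pvWalk, List.drop_zero, Nat.sub_zero, List.take_zero]
          rw [pvCuts_shift, pvWalk_cons, hdot.2, ih]
        · simp only [if_neg h1, if_neg h2, if_neg hdot]
          rw [pvCuts_shift, pvWalk_head, ih]
          simp [pvBump, h1, h2]

-- final filter/map reconciliation
lemma pv_filter_map (L : List (List Char)) :
    ((L.filter (fun x => !(x == []))).map String.ofList).filter (fun k => !(k == "$"))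
      = (L.map String.ofList).filter (fun seg => !(seg == "") && !(seg == "$")) := by
  induction L with
  | nil => rfl
  | cons x xs ih =>
    have h1 : (String.ofList x == "") = (x == ([] : List Char)) := by
      cases h : (x == ([] : List Char)) <;> simp_all [String.ext_iff]
    have h2 : (String.ofList x == "$") = (x == ['$']) := by
      cases h : (x == ['$']) <;> simp_all [String.ext_iff]
    by_cases hx : x = []
    · subst hx
      have c1 : (!(([] : List Char) == [])) = false := rfl
      have c2 : (!(String.ofList ([] : List Char) == "") && !(String.ofList ([] : List Char) == "$")) = false := by decide
      simp only [List.filter_cons, List.map_cons, c1, c2, Bool.false_eq_true, if_false, ih]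
    · by_cases hx2 : x = ['$']
      · subst hx2
        have c1 : (!((['$'] : List Char) == [])) = true := rfl
        have cA : (!(String.ofList ['$'] == "$")) = false := by decide
        have c2 : (!(String.ofList ['$'] == "") && !(String.ofList ['$'] == "$")) = false := by decide
        simp only [List.filter_cons, List.map_cons, c1, cA, Bool.and_false, Bool.false_eq_true,
          if_false, if_true, ih]
      · have c1 : (!(x == [])) = true := by simp [hx]
        have cA : (!(String.ofList x == "$")) = true := by rw [h2]; simp [hx2]
        have c3 : (!(String.ofList x == "")) = true := by rw [h1]; simp [hx]
        simp only [List.filter_cons, List.map_cons, c1, cA, Bool.and_true, c3, if_true, ih]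

-- ===== VERDICT (by name: the statement is the Claim_ definition above) =====
theorem split_jsonpath_spec : Claim_equal_split_jsonpath := by
  intro jpath _
  have hA : (let st := jpath.toList.foldl pvStepA ([], [], 0);
      if st.2.1 ≠ [] then st.1 ++ [st.2.1] else st.1)
      = (pvSegSpec 0 jpath.toList).filter (fun x => !(x == [])) := by
    rw [pvA_inv jpath.toList [] [] 0, pvConsList_nil (pvSegSpec_ne_nil _ _)]
    simp
  have hB : (((0 :: (pvCutsB jpath.toList 0 0).map (· + 1)).zip
        ((pvCutsB jpath.toList 0 0) ++ [jpath.toList.length])).map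
        (fun p => (jpath.toList.drop p.1).take (p.2 - p.1)))
      = pvSegSpec 0 jpath.toList := by
    rw [pvZip_walk _ jpath.toList (fun p => rfl), pvB_main]
  have hmap : ((((0 :: (pvCutsB jpath.toList 0 0).map (· + 1)).zip
        ((pvCutsB jpath.toList 0 0) ++ [jpath.toList.length])).map
        (fun p => (jpath.toList.drop p.1).take (p.2 - p.1))).map String.ofList)
      = (((0 :: (pvCutsB jpath.toList 0 0).map (· + 1)).zip
        ((pvCutsB jpath.toList 0 0) ++ [jpath.toList.length])).map
        (fun p => String.ofList ((jpath.toList.drop p.1).take (p.2 - p.1)))) := by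
    rw [List.map_map]; rfl
  simp only [Spec_split_jsonpath, split_jsonpath, split_jsonpath_alt]
  rw [hA, ← hmap, hB]
  exact pv_filter_map _
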